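-- pv_equiv track=rewrite | github.com/krishnasahu29/Data-Structures-and-Algorithms-in-Python | Hash Table/Leetcode Problems/1207. Unique Number of Occurrences.py | uniqueOccurrences
-- ===== SOURCE A (Python) =====
-- from typing import List
--
-- def uniqueOccurrences(arr: List[int]) -> bool:
--     hash_table = {}
--     for num in arr:
--         if num not in hash_table.keys():
--             hash_table[num] = 0
--
--         else:
--             hash_table[num] += 1
--
--     return len(hash_table.values()) == len(set(hash_table.values()))
-- ===== SOURCE B (Python) =====
-- from typing import List
--
-- def uniqueOccurrences(arr: List[int]) -> bool:
--     # Sort-and-group instead of hashing: run lengths of the sorted list are the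
--     # occurrence counts; the answer is whether they are pairwise distinct.
--     s = sorted(arr)
--     counts = []
--     run = 0
--     prev = None
--     for v in s:
--         if run > 0 and v != prev:
--             counts.append(run)
--             run = 0
--         run += 1
--         prev = v
--     if run > 0:
--         counts.append(run)
--     return len(counts) == len(set(counts))
-- ===== Notes on version B (the rewrite author's own statement) =====
-- stated objective: alternative
-- what changed: Replaces incremental hash-table frequency counting with sorting the array and scanning maximal runs of equal elements (recursive grouping), then checking distinctness of the run lengths.
import Mathlib
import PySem

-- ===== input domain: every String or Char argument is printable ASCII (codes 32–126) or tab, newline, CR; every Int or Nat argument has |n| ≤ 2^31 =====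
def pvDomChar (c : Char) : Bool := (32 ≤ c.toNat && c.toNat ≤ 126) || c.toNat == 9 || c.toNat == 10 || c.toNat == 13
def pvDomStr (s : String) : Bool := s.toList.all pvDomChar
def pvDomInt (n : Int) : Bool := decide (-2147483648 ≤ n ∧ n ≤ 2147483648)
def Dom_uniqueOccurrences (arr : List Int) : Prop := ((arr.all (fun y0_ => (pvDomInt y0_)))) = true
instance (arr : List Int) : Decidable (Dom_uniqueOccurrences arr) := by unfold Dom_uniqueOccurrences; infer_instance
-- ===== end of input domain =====

-- B replaces A's hash-table frequency counting with sort-and-group run-length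
-- counting (alternative algorithm, same results).

-- ===== PORT A =====
def uniqueOccurrences (arr : List Int) : Bool :=
  let hash_table : PySem.Dict Int Int :=
    arr.foldl (fun d num =>
      if (d.contains num) = false then d.insert num 0
      else d.modify num 0 (fun v => v + 1)) PySem.Dict.empty
  hash_table.values.length == (PySem.Set.ofList hash_table.values).length

-- ===== PORT B =====
-- loop body: close the current run when the value changes, then extend the run
def altStep (st : List Int × Int × Option Int) (v : Int) : List Int × Int × Option Int :=
  if 0 < st.2.1 ∧ st.2.2 ≠ some v then (st.1 ++ [st.2.1], 0 + 1, some v)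
  else (st.1, st.2.1 + 1, some v)

-- after the loop: append the last open run, if any
def altFinal (st : List Int × Int × Option Int) : List Int :=
  if 0 < st.2.1 then st.1 ++ [st.2.1] else st.1

def uniqueOccurrences_alt (arr : List Int) : Bool :=
  let s := PySem.List.sorted arr (fun x => x) false
  let counts := altFinal (s.foldl altStep ([], 0, none))
  counts.length == (PySem.Set.ofList counts).length

-- ===== PRECONDITION & SPEC =====
def Spec_uniqueOccurrences (arr : List Int) (out : Bool) : Prop := out = uniqueOccurrences_alt arr
instance (arr : List Int) (out : Bool) : Decidable (Spec_uniqueOccurrences arr out) := by unfold Spec_uniqueOccurrences; infer_instance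

-- ===== CLAIM (what is proved, stated in full; the proofs are below) =====
def Claim_equal_uniqueOccurrences : Prop := ∀ (arr : List Int), Dom_uniqueOccurrences arr → Spec_uniqueOccurrences arr (uniqueOccurrences arr)

-- ===== LEMMAS AND PROOFS =====

-- recursive run-length characterisation of B's single-pass loop
def runLengths (s : List Int) : List Int :=
  match s with
  | [] => []
  | x :: xs =>
    let k := (xs.takeWhile (fun y => y == x)).length
    ((k : Int) + 1) :: runLengths (xs.drop k)
termination_by s.length
decreasing_by
  simp only [List.length_cons, List.length_drop]
  omega

lemma go_spec (l : List Int) : ∀ (counts : List Int) (r x : Int), 0 < r →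
    altFinal (l.foldl altStep (counts, r, some x)) =
    counts ++ (r + ((l.takeWhile (fun y => y == x)).length : Int))
      :: runLengths (l.drop (l.takeWhile (fun y => y == x)).length) := by
  induction l with
  | nil =>
    intro counts r x hr
    simp [altFinal, runLengths, hr]
  | cons y ys ih =>
    intro counts r x hr
    by_cases hyx : y = x
    · subst hyx
      rw [List.foldl_cons]
      have hstep : altStep (counts, r, some y) y = (counts, r + 1, some y) := by
        simp [altStep]
      rw [hstep, ih counts (r + 1) y (by omega)]
      simp only [List.takeWhile_cons, beq_self_eq_true, if_pos, List.length_cons,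
        List.drop_succ_cons]
      congr 2
      push_cast
      ring
    · rw [List.foldl_cons]
      have hstep : altStep (counts, r, some x) y = (counts ++ [r], 0 + 1, some y) := by
        simp only [altStep]
        rw [if_pos ⟨hr, by simpa using fun he => hyx he.symm⟩]
      rw [hstep, show (0:Int) + 1 = 1 by ring, ih (counts ++ [r]) 1 y (by omega)]
      have htw : (y :: ys).takeWhile (fun z => z == x) = [] := by
        simp [hyx]
      rw [htw]
      simp only [List.length_nil, List.drop_zero, Nat.cast_zero, add_zero]
      rw [runLengths]
      simp only [List.append_assoc, List.cons_append, List.nil_append]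
      have hco : ((1:Int) + ((ys.takeWhile (fun z => z == y)).length : Int)) =
          (((ys.takeWhile (fun z => z == y)).length : Int) + 1) := by ring
      rw [hco]

lemma alt_counts (s : List Int) : altFinal (s.foldl altStep ([], 0, none)) = runLengths s := by
  cases s with
  | nil => simp [altFinal, runLengths]
  | cons x xs =>
    rw [List.foldl_cons]
    have hstep : altStep ([], 0, none) x = ([], 0 + 1, some x) := by simp [altStep]
    rw [hstep, show (0:Int) + 1 = 1 by ring, go_spec xs [] 1 x (by omega)]
    rw [runLengths]
    simp only [List.nil_append]
    have hco : (1:Int) + ((xs.takeWhile (fun y => y == x)).length : Int) =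
        ((xs.takeWhile (fun y => y == x)).length : Int) + 1 := by ring
    rw [hco]

-- `len(l) == len(set(l))` is exactly distinctness of l
lemma ofList_perm_dedup (l : List Int) : (PySem.Set.ofList l : List Int).Perm l.dedup := by
  refine (List.perm_ext_iff_of_nodup (PySem.Set.nodup_ofList l) (List.nodup_dedup l)).mpr ?_
  intro x
  rw [PySem.Set.mem_ofList, List.mem_dedup]

lemma nodup_len_set (l : List Int) :
    (l.length == (PySem.Set.ofList l).length) = decide l.Nodup := by
  rw [(ofList_perm_dedup l).length_eq]
  by_cases h : l.Nodup
  · simp [List.dedup_eq_self.mpr h, h]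
  · simp only [h, decide_false, beq_eq_false_iff_ne, ne_eq]
    intro hlen
    exact h (List.dedup_eq_self.mp ((List.dedup_sublist l).eq_of_length hlen.symm))

-- A's dict keys, in first-occurrence order
def keysOf (l : List Int) : List Int :=
  l.foldl (fun ks x => if x ∈ ks then ks else ks ++ [x]) []

lemma keysOf_snoc (l : List Int) (x : Int) :
    keysOf (l ++ [x]) = if x ∈ keysOf l then keysOf l else keysOf l ++ [x] := by
  simp [keysOf, List.foldl_append]

lemma mem_keysOf (l : List Int) (x : Int) : x ∈ keysOf l ↔ x ∈ l := by
  induction l using List.reverseRecOn with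
  | nil => simp [keysOf]
  | append_singleton l y ih =>
    rw [keysOf_snoc]
    by_cases h : y ∈ keysOf l <;> simp [h, ih] <;> aesop

lemma keysOf_perm_dedup (l : List Int) : (keysOf l).Perm l.dedup := by
  have hnd : (keysOf l).Nodup := by
    induction l using List.reverseRecOn with
    | nil => simp [keysOf]
    | append_singleton l y ih =>
      rw [keysOf_snoc]
      by_cases h : y ∈ keysOf l
      · simpa [h]
      · simp only [h, if_false, List.nodup_append]
        refine ⟨ih, List.nodup_singleton y, fun a ha b hb he => h ?_⟩
        simp only [List.mem_singleton] at hb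
        rw [← hb, ← he]
        exact ha
  refine (List.perm_ext_iff_of_nodup hnd (List.nodup_dedup l)).mpr ?_
  intro x
  rw [mem_keysOf, List.mem_dedup]

-- the model of A's dict after processing p: keys in first-occurrence order,
-- each mapped to its count in p minus one
def modelOf (p : List Int) : PySem.Dict Int Int :=
  PySem.Dict.mk ((keysOf p).map (fun k => (k, (List.count k p : Int) - 1)))

lemma find?_beq_of_mem {l : List Int} {a : Int} (h : a ∈ l) :
    l.find? (fun k => k == a) = some a := by
  induction l with
  | nil => simp at h
  | cons x xs ih =>
    by_cases hx : x = a
    · simp [hx]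
    · have hmem : a ∈ xs := by
        rcases List.mem_cons.mp h with h1 | h1
        · exact absurd h1.symm hx
        · exact h1
      simp [hx, ih hmem]

lemma contains_model (p : List Int) (num : Int) :
    (modelOf p).contains num = decide (num ∈ p) := by
  simp only [PySem.Dict.contains, modelOf, List.any_map]
  by_cases h : num ∈ p
  · simp only [h, decide_true]
    rw [List.any_eq_true]
    exact ⟨num, (mem_keysOf p num).mpr h, by simp⟩
  · simp only [h, decide_false]
    rw [List.any_eq_false]
    intro k hk
    simp only [Function.comp_apply, beq_iff_eq]
    intro he
    exact h ((mem_keysOf p num).mp (he ▸ hk))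

lemma count_snoc_self (p : List Int) (num : Int) :
    List.count num (p ++ [num]) = List.count num p + 1 := by
  simp [List.count_append]

lemma count_snoc_ne (p : List Int) (num k : Int) (h : k ≠ num) :
    List.count k (p ++ [num]) = List.count k p := by
  simp [List.count_append, List.count_singleton]
  intro he
  exact absurd he.symm h

lemma step_model (p : List Int) (num : Int) :
    (if ((modelOf p).contains num) = false then (modelOf p).insert num 0
     else (modelOf p).modify num 0 (fun v => v + 1)) = modelOf (p ++ [num]) := by
  by_cases h : num ∈ p
  · rw [if_neg (by rw [contains_model]; simp [h])]
    have hget : (modelOf p).get? num = some ((List.count num p : Int) - 1) := by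
      simp only [PySem.Dict.get?, modelOf, List.find?_map]
      have he : (fun (q : Int × Int) => q.1 == num) ∘ (fun k => (k, (List.count k p : Int) - 1))
           = fun k => k == num := rfl
      rw [he, find?_beq_of_mem ((mem_keysOf p num).mpr h)]
      rfl
    rw [PySem.Dict.modify, PySem.Dict.getD, hget]
    simp only [Option.getD_some]
    rw [PySem.Dict.insert, if_pos (by rw [contains_model]; simp [h])]
    show PySem.Dict.mk _ = _
    simp only [modelOf, keysOf_snoc, if_pos ((mem_keysOf p num).mpr h), List.map_map]
    refine congrArg PySem.Dict.mk (List.map_congr_left ?_)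
    intro k hk
    simp only [Function.comp_apply]
    by_cases hkn : k = num
    · subst hkn
      simp only [beq_self_eq_true, if_pos]
      refine Prod.ext rfl ?_
      simp only [count_snoc_self]
      push_cast
      ring
    · rw [if_neg (by simp [hkn]), count_snoc_ne p num k hkn]
  · rw [if_pos (by rw [contains_model]; simp [h])]
    rw [PySem.Dict.insert, if_neg (by rw [contains_model]; simp [h])]
    simp only [modelOf, keysOf_snoc, if_neg (fun hm => h ((mem_keysOf p num).mp hm)),
      List.map_append]
    refine congrArg PySem.Dict.mk ?_
    refine congrArg₂ (· ++ ·) (List.map_congr_left ?_) ?_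
    · intro k hk
      have hkn : k ≠ num := fun he => h (he ▸ (mem_keysOf p k).mp hk)
      rw [count_snoc_ne p num k hkn]
    · have h0 : List.count num p = 0 := List.count_eq_zero.mpr h
      simp [h0]

lemma foldA_go (rest p : List Int) :
    (rest.foldl (fun d num =>
      if (d.contains num) = false then d.insert num 0
      else d.modify num 0 (fun v => v + 1)) (modelOf p)) = modelOf (p ++ rest) := by
  induction rest generalizing p with
  | nil => simp
  | cons num rest ih =>
    rw [List.foldl_cons, step_model, ih]
    simp

lemma foldA_model (arr : List Int) :
    (arr.foldl (fun d num =>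
      if (d.contains num) = false then d.insert num 0
      else d.modify num 0 (fun v => v + 1)) PySem.Dict.empty) =
    PySem.Dict.mk ((keysOf arr).map (fun k => (k, (List.count k arr : Int) - 1))) := by
  have h0 : (PySem.Dict.empty : PySem.Dict Int Int) = modelOf [] := rfl
  rw [h0, foldA_go]
  rfl

-- run lengths of a sorted list = the multiset of occurrence counts
lemma runLengths_perm_aux (n : Nat) : ∀ (s : List Int), s.length ≤ n →
    List.Pairwise (· ≤ ·) s →
    (runLengths s).Perm (s.dedup.map (fun k => (List.count k s : Int))) := by
  induction n with
  | zero =>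
    intro s hlen _
    have h0 : s = [] := List.length_eq_zero_iff.mp (Nat.le_zero.mp hlen)
    subst h0
    simp [runLengths]
  | succ n ih =>
    intro s hlen hs
    match s with
    | [] => simp [runLengths]
    | x :: xs =>
      set t := xs.takeWhile (fun y => y == x) with ht
      set r := xs.dropWhile (fun y => y == x) with hr
      have hxs : xs = t ++ r := (List.takeWhile_append_dropWhile).symm
      have hdrop : xs.drop t.length = r := by
        conv_lhs => rw [hxs]
        exact List.drop_left
      have ht_all : ∀ y ∈ t, y = x := by
        intro y hy
        have := List.mem_takeWhile_imp hy
        simpa using this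
      have hrsub : r.Sublist (x :: xs) :=
        (List.dropWhile_sublist _).trans (List.sublist_cons_self x xs)
      have hr_pw : List.Pairwise (· ≤ ·) r := hs.sublist hrsub
      have hxle : ∀ y ∈ xs, x ≤ y := fun y hy => (List.pairwise_cons.mp hs).1 y hy
      have hxr : x ∉ r := by
        intro hxin
        match hyr : r with
        | [] => simp at hxin
        | y :: ys =>
          have hhead := List.head?_dropWhile_not (fun z => z == x) xs
          rw [← hr] at hhead
          simp only [List.head?_cons] at hhead
          have hyx : y ≠ x := by simpa using hhead
          rcases List.mem_cons.mp hxin with h1 | h1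
          · exact hyx h1.symm
          · have h2 : y ≤ x := (List.pairwise_cons.mp hr_pw).1 x h1
            have h3 : x ≤ y := hxle y (by rw [hxs]; exact List.mem_append_right t List.mem_cons_self)
            exact hyx (le_antisymm h2 h3)
      have hcount_t : List.count x t = t.length := by
        rw [List.count_eq_length]
        intro y hy
        exact ((ht_all y hy) ▸ rfl)
      have hcount_x : List.count x (x :: xs) = t.length + 1 := by
        rw [List.count_cons_self, hxs, List.count_append, hcount_t,
          List.count_eq_zero.mpr hxr]
      have hcount_y : ∀ y ∈ r, List.count y (x :: xs) = List.count y r := by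
        intro y hy
        have hyx : y ≠ x := fun he => hxr (he ▸ hy)
        rw [List.count_cons_of_ne (by simpa using fun he => hyx he.symm), hxs, List.count_append]
        have h0 : List.count y t = 0 := by
          rw [List.count_eq_zero]
          intro hyt
          exact hyx (ht_all y hyt)
        omega
      have hdedup : (x :: xs).dedup.Perm (x :: r.dedup) := by
        refine (List.perm_ext_iff_of_nodup (List.nodup_dedup _) ?_).mpr ?_
        · exact List.nodup_cons.mpr ⟨fun hm => hxr (List.mem_dedup.mp hm), List.nodup_dedup r⟩
        · intro y
          rw [List.mem_dedup, List.mem_cons, List.mem_cons, List.mem_dedup]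
          constructor
          · rintro (h1 | h1)
            · exact Or.inl h1
            · rw [hxs] at h1
              rcases List.mem_append.mp h1 with h2 | h2
              · exact Or.inl (ht_all y h2)
              · exact Or.inr h2
          · rintro (h1 | h1)
            · exact Or.inl h1
            · exact Or.inr (by rw [hxs]; exact List.mem_append_right t h1)
      have hrlen : r.length ≤ n := by
        have h1 : r.length ≤ xs.length := (List.dropWhile_sublist _).length_le
        simp only [List.length_cons] at hlen
        omega
      have hih := ih r hrlen hr_pw
      show (runLengths (x :: xs)).Perm _
      rw [runLengths]
      simp only [← ht, hdrop]
      refine List.Perm.trans (List.Perm.cons _ hih) ?_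
      have hmapeq : r.dedup.map (fun k => (List.count k r : Int)) =
          r.dedup.map (fun k => (List.count k (x :: xs) : Int)) := by
        refine List.map_congr_left ?_
        intro y hy
        rw [hcount_y y (List.mem_dedup.mp hy)]
      rw [hmapeq]
      have hcons : ((t.length : Int) + 1) :: r.dedup.map (fun k => (List.count k (x :: xs) : Int)) =
          (x :: r.dedup).map (fun k => (List.count k (x :: xs) : Int)) := by
        simp only [List.map_cons, hcount_x]
        push_cast
        ring_nf
      rw [hcons]
      exact (hdedup.map _).symm

-- ===== VERDICT (by name: the statement is the Claim_ definition above) =====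
theorem uniqueOccurrences_spec : Claim_equal_uniqueOccurrences := by
  intro arr _
  unfold Spec_uniqueOccurrences uniqueOccurrences uniqueOccurrences_alt
  rw [foldA_model]
  have hvals : (PySem.Dict.mk ((keysOf arr).map (fun k => (k, (List.count k arr : Int) - 1)))).values
      = (keysOf arr).map (fun k => (List.count k arr : Int) - 1) := by
    simp [PySem.Dict.values, List.map_map]
  simp only [hvals, alt_counts, nodup_len_set]
  rw [decide_eq_decide]
  set s := PySem.List.sorted arr (fun x => x) false with hsdef
  have hperm : s.Perm arr := PySem.List.sorted_perm arr (fun x => x) false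
  have hpw : List.Pairwise (· ≤ ·) s := by
    have := PySem.List.sorted_pairwise (κ := Int) arr (fun x => x)
    simpa using this
  have hrl : (runLengths s).Perm (s.dedup.map (fun k => (List.count k s : Int))) :=
    runLengths_perm_aux s.length s le_rfl hpw
  have hcs : (fun k => (List.count k s : Int)) = (fun k => (List.count k arr : Int)) := by
    funext k
    rw [hperm.count_eq k]
  rw [hcs] at hrl
  have hchain : (runLengths s).Perm ((keysOf arr).map (fun k => (List.count k arr : Int))) :=
    hrl.trans ((hperm.dedup.map _).trans ((keysOf_perm_dedup arr).map _).symm)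
  -- distinctness of counts ↔ distinctness of counts - 1
  have hsub : ((keysOf arr).map (fun k => (List.count k arr : Int) - 1)).Nodup ↔
      ((keysOf arr).map (fun k => (List.count k arr : Int))).Nodup := by
    have hm : (keysOf arr).map (fun k => (List.count k arr : Int) - 1) =
        ((keysOf arr).map (fun k => (List.count k arr : Int))).map (fun z => z - 1) := by
      rw [List.map_map]
      rfl
    rw [hm]
    exact List.nodup_map_iff (fun a b hab => by omega)
  rw [hsub]
  exact (hchain.nodup_iff).symm
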